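-- pv_equiv track=rewrite | github.com/Potaeeatsthis/ds-kmitl-2025 | sort/10-3.py | classify_number
-- ===== SOURCE A (Python) =====
-- def classify_number(s):
--     """
--     Classifies a number string into one of six categories based on its digits.
--     """
--     n = len(s)
--     if n <= 1:
--         # A number with one digit is always a Repdrome.
--         return "Repdrome"
--
--     # --- Initialize flags to check the number's properties ---
--     is_ascending = True
--     is_descending = True
--     has_duplicates = False
--
--     # --- Check for Repdrome (all digits are the same) ---
--     first_digit = s[0]
--     is_repdrome = True
--     for i in range(1, n):
--         if s[i] != first_digit:
--             is_repdrome = False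
--             break
--     if is_repdrome:
--         return "Repdrome"
--
--     # --- Check for any duplicates in the entire number ---
--     # We do this by checking every digit against every other digit that follows it.
--     for i in range(n):
--         for j in range(i + 1, n):
--             if s[i] == s[j]:
--                 has_duplicates = True
--                 break
--         if has_duplicates:
--             break
--
--     # --- Check for ascending or descending order ---
--     # We loop up to the second-to-last digit to compare it with the next one.
--     for i in range(n - 1):
--         # If a digit is greater than the next one, it can't be ascending.
--         if s[i] > s[i+1]:
--             is_ascending = False
--         # If a digit is less than the next one, it can't be descending.
--         if s[i] < s[i+1]:
--             is_descending = False
--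
--     # --- Final classification based on the flags ---
--     if is_ascending:
--         if has_duplicates:
--             return "Plaindrome"  # Ascending with duplicates
--         else:
--             return "Metadrome"   # Strictly ascending, no duplicates
--     elif is_descending:
--         if has_duplicates:
--             return "Nialpdrome"  # Descending with duplicates
--         else:
--             return "Katadrome"   # Strictly descending, no duplicates
--     else:
--         # If it's neither ascending nor descending, it's a Nondrome.
--         return "Nondrome"
-- ===== SOURCE B (Python) =====
-- def classify_number(s):
--     if len(s) <= 1:
--         return "Repdrome"
--     asc = True
--     desc = True
--     dup = False
--     for a, b in zip(s, s[1:]):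
--         if a > b:
--             asc = False
--         if a < b:
--             desc = False
--         if a == b:
--             dup = True
--     if asc and desc:
--         return "Repdrome"
--     if asc:
--         return "Plaindrome" if dup else "Metadrome"
--     if desc:
--         return "Nialpdrome" if dup else "Katadrome"
--     return "Nondrome"
-- ===== Notes on version B (the rewrite author's own statement) =====
-- stated objective: faster
-- what changed: One pass over adjacent pairs maintaining asc/desc/adjacent-dup flags replaces A's three separate scans (repdrome scan, nested worst-case O(n^2) duplicate scan, asc/desc scan); in a monotone run every duplicate is adjacent, so the adjacent-dup flag suffices.
import Mathlib
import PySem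

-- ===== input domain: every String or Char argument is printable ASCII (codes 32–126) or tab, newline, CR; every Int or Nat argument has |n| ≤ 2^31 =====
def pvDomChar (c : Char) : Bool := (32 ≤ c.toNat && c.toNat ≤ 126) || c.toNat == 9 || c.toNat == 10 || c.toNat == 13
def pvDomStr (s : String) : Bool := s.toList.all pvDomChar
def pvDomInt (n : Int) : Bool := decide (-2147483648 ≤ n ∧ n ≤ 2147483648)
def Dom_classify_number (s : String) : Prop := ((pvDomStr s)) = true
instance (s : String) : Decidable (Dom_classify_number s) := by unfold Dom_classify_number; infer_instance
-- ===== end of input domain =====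

-- One-pass B over adjacent pairs replaces A's three scans (incl. the nested duplicate scan); objective: simpler.


-- ===== PORT A =====
-- A's first loop: for i in range(1, n): if s[i] != first_digit: is_repdrome = False; break
def repAllA (c : Char) : List Char → Bool
  | [] => true
  | x :: xs => if x ≠ c then false else repAllA c xs

-- A's nested loops: for i … for j in range(i+1, n): if s[i] == s[j]: has_duplicates = True (with breaks)
def hasDupA : List Char → Bool
  | [] => false
  | x :: xs => xs.contains x || hasDupA xs

-- A's third loop over i in range(n-1), updating both flags
def ascDescA (asc desc : Bool) : List Char → Bool × Bool
  | a :: b :: rest => ascDescA (asc && !decide (b < a)) (desc && !decide (a < b)) (b :: rest)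
  | _ => (asc, desc)

def classifyA_core (l : List Char) : String :=
  if l.length ≤ 1 then "Repdrome"
  else
    match l with
    | [] => "Repdrome"  -- unreachable: length ≥ 2
    | c :: rest =>
      if repAllA c rest then "Repdrome"
      else
        let dup := hasDupA (c :: rest)
        let p := ascDescA true true (c :: rest)
        if p.1 then (if dup then "Plaindrome" else "Metadrome")
        else if p.2 then (if dup then "Nialpdrome" else "Katadrome")
        else "Nondrome"

def classify_number (s : String) : String := classifyA_core s.toList

-- ===== PORT B =====
-- B's single loop over zip(s, s[1:]) maintaining (asc, desc, dup)
def bloop (asc desc dup : Bool) : List Char → Bool × Bool × Bool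
  | a :: b :: rest =>
      bloop (asc && !decide (b < a)) (desc && !decide (a < b)) (dup || (a == b)) (b :: rest)
  | _ => (asc, desc, dup)

def classify_number_alt (s : String) : String :=
  let l := s.toList
  if l.length ≤ 1 then "Repdrome"
  else
    let t := bloop true true false l
    if t.1 && t.2.1 then "Repdrome"
    else if t.1 then (if t.2.2 then "Plaindrome" else "Metadrome")
    else if t.2.1 then (if t.2.2 then "Nialpdrome" else "Katadrome")
    else "Nondrome"

-- ===== PRECONDITION & SPEC =====
def Spec_classify_number (s : String) (out : String) : Prop := out = classify_number_alt s
instance (s : String) (out : String) : Decidable (Spec_classify_number s out) := by unfold Spec_classify_number; infer_instance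

-- ===== CLAIM (what is proved, stated in full; the proofs are below) =====
def Claim_equal_classify_number : Prop := ∀ (s : String), Dom_classify_number s → Spec_classify_number s (classify_number s)

-- ===== LEMMAS AND PROOFS =====

-- adjacent non-decreasing / non-increasing / adjacent-duplicate spec functions
def chA : List Char → Bool
  | a :: b :: rest => !decide (b < a) && chA (b :: rest)
  | _ => true

def chD : List Char → Bool
  | a :: b :: rest => !decide (a < b) && chD (b :: rest)
  | _ => true

def chE : List Char → Bool
  | a :: b :: rest => (a == b) || chE (b :: rest)
  | _ => false

theorem ascDescA_eq : ∀ (l : List Char) (asc desc : Bool),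
    ascDescA asc desc l = (asc && chA l, desc && chD l) := by
  intro l
  induction l with
  | nil => intro asc desc; simp [ascDescA, chA, chD]
  | cons a xs ih =>
    intro asc desc
    cases xs with
    | nil => simp [ascDescA, chA, chD]
    | cons b r =>
      simp only [ascDescA, chA, chD, ih, Bool.and_assoc]

theorem bloop_eq : ∀ (l : List Char) (asc desc dup : Bool),
    bloop asc desc dup l = (asc && chA l, desc && chD l, dup || chE l) := by
  intro l
  induction l with
  | nil => intro asc desc dup; simp [bloop, chA, chD, chE]
  | cons a xs ih =>
    intro asc desc dup
    cases xs with
    | nil => simp [bloop, chA, chD, chE]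
    | cons b r =>
      simp only [bloop, chA, chD, chE, ih, Bool.and_assoc, Bool.or_assoc]

theorem repAllA_eq : ∀ (rest : List Char) (c : Char),
    repAllA c rest = (chA (c :: rest) && chD (c :: rest)) := by
  intro rest
  induction rest with
  | nil => intro c; simp [repAllA, chA, chD]
  | cons y r ih =>
    intro c
    by_cases h : y = c
    · subst h
      simp [repAllA, chA, chD, ih y]
    · have : y < c ∨ c < y := lt_or_gt_of_ne h
      rcases this with h1 | h1
      · simp [repAllA, chA, chD, h, h1]
      · simp [repAllA, chA, chD, h, h1]

theorem chA_head_le : ∀ (r : List Char) (y : Char), chA (y :: r) = true →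
    ∀ z ∈ r, y ≤ z := by
  intro r
  induction r with
  | nil => intro y _ z hz; simp at hz
  | cons b r' ih =>
    intro y h z hz
    simp only [chA, Bool.and_eq_true, Bool.not_eq_true', decide_eq_false_iff_not, not_lt] at h
    rcases List.mem_cons.mp hz with rfl | hz'
    · exact h.1
    · exact le_trans h.1 (ih b (by
        have := h.2
        simpa [chA] using this) z hz')

theorem chD_head_ge : ∀ (r : List Char) (y : Char), chD (y :: r) = true →
    ∀ z ∈ r, z ≤ y := by
  intro r
  induction r with
  | nil => intro y _ z hz; simp at hz
  | cons b r' ih =>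
    intro y h z hz
    simp only [chD, Bool.and_eq_true, Bool.not_eq_true', decide_eq_false_iff_not, not_lt] at h
    rcases List.mem_cons.mp hz with rfl | hz'
    · exact h.1
    · exact le_trans (ih b (by simpa [chD] using h.2) z hz') h.1

theorem chA_tail : ∀ (a : Char) (xs : List Char), chA (a :: xs) = true → chA xs = true := by
  intro a xs h
  cases xs with
  | nil => simp [chA]
  | cons b r => simp only [chA, Bool.and_eq_true] at h; exact h.2

theorem chD_tail : ∀ (a : Char) (xs : List Char), chD (a :: xs) = true → chD xs = true := by
  intro a xs h
  cases xs with
  | nil => simp [chD]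
  | cons b r => simp only [chD, Bool.and_eq_true] at h; exact h.2

theorem hasDupA_eq_chE_of_chA : ∀ (l : List Char), chA l = true → hasDupA l = chE l := by
  intro l
  induction l with
  | nil => intro _; simp [hasDupA, chE]
  | cons x xs ih =>
    intro h
    have htail := ih (chA_tail x xs h)
    cases xs with
    | nil => simp [hasDupA, chE]
    | cons y r =>
      have hxy : x ≤ y := by
        simp only [chA, Bool.and_eq_true, Bool.not_eq_true', decide_eq_false_iff_not,
          not_lt] at h
        exact h.1
      rw [show hasDupA (x :: y :: r) = (List.contains (y :: r) x || hasDupA (y :: r)) from rfl,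
        htail]
      simp only [chE]
      congr 1
      by_cases hxy2 : x = y
      · subst hxy2; simp
      · have hx_not_r : x ∉ r := by
          intro hxr
          have : y ≤ x := chA_head_le r y (chA_tail x (y :: r) h) x hxr
          exact hxy2 (le_antisymm hxy this)
        have hx : x ∉ y :: r := by simp [hxy2, hx_not_r]
        simp [List.contains_eq_mem, hx, hxy2]

theorem hasDupA_eq_chE_of_chD : ∀ (l : List Char), chD l = true → hasDupA l = chE l := by
  intro l
  induction l with
  | nil => intro _; simp [hasDupA, chE]
  | cons x xs ih =>
    intro h
    have htail := ih (chD_tail x xs h)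
    cases xs with
    | nil => simp [hasDupA, chE]
    | cons y r =>
      have hxy : y ≤ x := by
        simp only [chD, Bool.and_eq_true, Bool.not_eq_true', decide_eq_false_iff_not,
          not_lt] at h
        exact h.1
      rw [show hasDupA (x :: y :: r) = (List.contains (y :: r) x || hasDupA (y :: r)) from rfl,
        htail]
      simp only [chE]
      congr 1
      by_cases hxy2 : x = y
      · subst hxy2; simp
      · have hx_not_r : x ∉ r := by
          intro hxr
          have : x ≤ y := chD_head_ge r y (chD_tail x (y :: r) h) x hxr
          exact hxy2 (le_antisymm this hxy)
        have hx : x ∉ y :: r := by simp [hxy2, hx_not_r]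
        simp [List.contains_eq_mem, hx, hxy2]

theorem core_eq : ∀ (l : List Char),
    classifyA_core l =
      (if l.length ≤ 1 then "Repdrome"
       else
         let t := bloop true true false l
         if t.1 && t.2.1 then "Repdrome"
         else if t.1 then (if t.2.2 then "Plaindrome" else "Metadrome")
         else if t.2.1 then (if t.2.2 then "Nialpdrome" else "Katadrome")
         else "Nondrome") := by
  intro l
  by_cases hlen : l.length ≤ 1
  · simp [classifyA_core, hlen]
  · cases l with
    | nil => simp at hlen
    | cons c rest =>
      simp only [classifyA_core, hlen, if_false, bloop_eq, ascDescA_eq, repAllA_eq,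
        Bool.true_and, Bool.false_or]
      cases hA : chA (c :: rest) <;> cases hD : chD (c :: rest) <;> simp
      · rw [hasDupA_eq_chE_of_chD _ hD]
      · rw [hasDupA_eq_chE_of_chA _ hA]

-- ===== VERDICT (by name: the statement is the Claim_ definition above) =====
theorem classify_number_spec : Claim_equal_classify_number := by
  intro s _
  unfold Spec_classify_number classify_number classify_number_alt
  exact core_eq s.toList
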